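-- pv_equiv track=rewrite | github.com/asholok/zipverter | zipverter/APIs/city_response.py | shortfy_country_name
-- ===== SOURCE A (Python) =====
-- WHITE_LIST = ['United Kingdom', 'Canada', 'New Zealand', 'Australia', 'South Africa']
--
-- def shortfy_country_name(country):
--     if country in WHITE_LIST:
--         if country == 'South Africa':
--             return "-South-Africa"
--         words = country.split(' ')
--         if len(words) > 1:
--            return "-" + ''.join([word[0] for word in words])
--         return "-" + country
--     return ''
-- ===== SOURCE B (Python) =====
-- WHITE_LIST = ['United Kingdom', 'Canada', 'New Zealand', 'Australia', 'South Africa']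
--
-- SHORT_CODES = {
--     'United Kingdom': '-UK',
--     'Canada': '-Canada',
--     'New Zealand': '-NZ',
--     'Australia': '-Australia',
--     'South Africa': '-South-Africa',
-- }
--
-- def shortfy_country_name(country):
--     if country in WHITE_LIST:
--         return SHORT_CODES[country]
--     return ''
-- ===== Notes on version B (the rewrite author's own statement) =====
-- stated objective: idiomatic
-- what changed: Replaces the per-call split/first-letter-comprehension/word-count derivation with a precomputed static table SHORT_CODES looked up once; the whitelist guard is kept for non-member inputs.
import Mathlib
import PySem

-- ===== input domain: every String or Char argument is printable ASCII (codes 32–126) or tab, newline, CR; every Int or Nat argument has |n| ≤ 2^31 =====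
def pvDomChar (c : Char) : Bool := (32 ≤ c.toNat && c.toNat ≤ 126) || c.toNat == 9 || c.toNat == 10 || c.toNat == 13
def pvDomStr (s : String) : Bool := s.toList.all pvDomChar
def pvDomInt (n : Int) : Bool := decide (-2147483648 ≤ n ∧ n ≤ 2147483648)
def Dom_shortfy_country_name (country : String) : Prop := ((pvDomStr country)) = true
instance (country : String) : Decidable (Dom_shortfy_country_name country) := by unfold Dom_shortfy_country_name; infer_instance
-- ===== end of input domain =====

-- ===== PORT A =====
-- B replaces A's per-call split/first-letter derivation with a static lookup table (idiomatic).
def pvWhiteList : List String :=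
  ["United Kingdom", "Canada", "New Zealand", "Australia", "South Africa"]

-- word[0] -- exact here: every word reached is nonempty (only whitelisted names reach it)
def pvFirstChar (w : String) : String :=
  match PySem.Str.pyGet? w 0 with
  | some c => String.ofList [c]
  | none => ""

def shortfy_country_name (country : String) : String :=
  if country ∈ pvWhiteList then
    if country == "South Africa" then "-South-Africa"
    else
      let words := (PySem.Str.split? country " ").getD []  -- sep " " nonempty: split? is some
      if words.length > 1 then "-" ++ PySem.Str.join "" (words.map pvFirstChar)
      else "-" ++ country
  else ""

-- ===== PORT B =====
def pvShortCodes : PySem.Dict String String :=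
  PySem.Dict.ofList [("United Kingdom", "-UK"), ("Canada", "-Canada"), ("New Zealand", "-NZ"),
   ("Australia", "-Australia"), ("South Africa", "-South-Africa")]

-- SHORT_CODES[country] -- exact here: the key is present whenever the guard holds
def shortfy_country_name_alt (country : String) : String :=
  if country ∈ pvWhiteList then
    (PySem.Dict.get? pvShortCodes country).getD ""
  else ""

-- ===== PRECONDITION & SPEC =====
def Spec_shortfy_country_name (country : String) (out : String) : Prop := out = shortfy_country_name_alt country
instance (country : String) (out : String) : Decidable (Spec_shortfy_country_name country out) := by unfold Spec_shortfy_country_name; infer_instance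

-- ===== CLAIM (what is proved, stated in full; the proofs are below) =====
def Claim_equal_shortfy_country_name : Prop := ∀ (country : String), Dom_shortfy_country_name country → Spec_shortfy_country_name country (shortfy_country_name country)

-- ===== LEMMAS AND PROOFS =====

-- ===== VERDICT (by name: the statement is the Claim_ definition above) =====
theorem shortfy_country_name_spec : Claim_equal_shortfy_country_name := by
  intro country _
  unfold Spec_shortfy_country_name shortfy_country_name shortfy_country_name_alt
  by_cases h : country ∈ pvWhiteList
  · simp only [if_pos h]
    simp only [pvWhiteList, List.mem_cons, List.not_mem_nil, or_false] at h
    rcases h with h | h | h | h | h <;> subst h <;> decide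
  · simp [if_neg h]
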